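-- pv_equiv track=rewrite | github.com/Madfarm/matrix_manipulation_scripts | shape-cypher/b.py | decode_note
-- ===== SOURCE A (Python) =====
-- def decode_note(note, key):
--     # Create a dictionary for mapping symbols to letters
--     symbol_to_letter = {symbol: letter for symbol, letter in zip(key, 'abcdefghijklmnopqrstuvwxyz')}
--
--     # Create a dictionary for mapping consecutive symbols to special characters
--     consecutive_symbol_to_special_char = {symbol: special_char for symbol, special_char in zip(key, '!@#$%^&*()_+{}|:"<>?')}
--
--     # Initialize an empty string for the decoded message
--     decoded_message = ''
--
--     # Iterate over the note
--     i = 0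
--     while i < len(note):
--         # Get the current symbol
--         symbol = note[i]
--
--         # Check if the symbol is consecutive
--         if i < len(note) - 1 and note[i + 1] == symbol:
--             decoded_message += consecutive_symbol_to_special_char[symbol]
--             i += 2  # Skip the next symbol since we've already processed it
--         else:
--             decoded_message += symbol_to_letter[symbol]
--             i += 1
--
--     return decoded_message
-- ===== SOURCE B (Python) =====
-- def decode_note(note, key):
--     # Same two mappings as the original
--     symbol_to_letter = {symbol: letter for symbol, letter in zip(key, 'abcdefghijklmnopqrstuvwxyz')}
--     consecutive_symbol_to_special_char = {symbol: special_char for symbol, special_char in zip(key, '!@#$%^&*()_+{}|:"<>?')}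
--
--     parts = []
--     n = len(note)
--     i = 0
--     while i < n:
--         # find the maximal run of note[i]
--         j = i
--         while j < n and note[j] == note[i]:
--             j += 1
--         c = j - i
--         if c // 2:
--             parts.append(consecutive_symbol_to_special_char[note[i]] * (c // 2))
--         if c % 2:
--             parts.append(symbol_to_letter[note[i]])
--         i = j
--     return ''.join(parts)
-- ===== Notes on version B (the rewrite author's own statement) =====
-- stated objective: alternative
-- what changed: A walks the note one index at a time, pairing a symbol with its immediate successor and concatenating onto a string; B instead splits the note into maximal runs of equal symbols and, per run of length c, emits the special character c//2 times and the letter if c is odd, collecting parts in a list joined at the end.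
import Mathlib
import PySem

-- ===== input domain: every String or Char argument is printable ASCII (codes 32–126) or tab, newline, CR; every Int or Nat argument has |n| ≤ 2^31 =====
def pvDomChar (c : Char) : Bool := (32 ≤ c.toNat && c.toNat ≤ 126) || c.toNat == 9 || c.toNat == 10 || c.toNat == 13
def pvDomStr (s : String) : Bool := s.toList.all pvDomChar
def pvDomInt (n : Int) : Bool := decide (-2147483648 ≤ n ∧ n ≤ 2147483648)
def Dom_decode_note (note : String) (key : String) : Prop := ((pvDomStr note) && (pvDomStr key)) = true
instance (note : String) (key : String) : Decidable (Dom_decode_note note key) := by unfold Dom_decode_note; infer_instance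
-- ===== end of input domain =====

-- B replaces A's index-by-index pairing walk with a run-length decomposition of the note
-- (per run of length c: special char c//2 times, letter if c is odd), joining parts at the end.


-- ===== PORT A =====
-- {symbol: letter for symbol, letter in zip(key, '…')} : insert-in-order dict build
def pvMkMap (ks vs : List Char) : PySem.Dict Char Char :=
  (ks.zip vs).foldl (fun d p => d.insert p.1 p.2) PySem.Dict.empty

-- A's while loop over the note; getD default is never reached under Pre_ (Python raises KeyError there)
def pvLoopA (s2l sp : PySem.Dict Char Char) : List Char → List Char
  | [] => []
  | [c] => [s2l.getD c c]
  | c :: c2 :: rest =>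
      if c2 = c then sp.getD c c :: pvLoopA s2l sp rest
      else s2l.getD c c :: pvLoopA s2l sp (c2 :: rest)

def decode_note (note : String) (key : String) : String :=
  let s2l := pvMkMap key.toList "abcdefghijklmnopqrstuvwxyz".toList
  let sp  := pvMkMap key.toList "!@#$%^&*()_+{}|:\"<>?".toList
  String.ofList (pvLoopA s2l sp note.toList)

-- ===== PORT B =====
-- B's outer while loop: one step per maximal run; inner scan = takeWhile/dropWhile; parts list
def pvLoopB (s2l sp : PySem.Dict Char Char) : List Char → List (List Char)
  | [] => []
  | c :: rest =>
      (if ((rest.takeWhile (· = c)).length + 1) / 2 ≠ 0 then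
        [List.replicate (((rest.takeWhile (· = c)).length + 1) / 2) (sp.getD c c)] else []) ++
      (if ((rest.takeWhile (· = c)).length + 1) % 2 ≠ 0 then [[s2l.getD c c]] else []) ++
      pvLoopB s2l sp (rest.dropWhile (· = c))
  termination_by l => l.length
  decreasing_by
    simp only [List.length_cons]
    exact Nat.lt_succ_of_le (List.length_dropWhile_le _ _)

def decode_note_alt (note : String) (key : String) : String :=
  let s2l := pvMkMap key.toList "abcdefghijklmnopqrstuvwxyz".toList
  let sp  := pvMkMap key.toList "!@#$%^&*()_+{}|:\"<>?".toList
  String.ofList ((pvLoopB s2l sp note.toList).flatten)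

-- ===== PRECONDITION & SPEC =====
-- Pre_ excludes exactly the inputs on which the Python A raises KeyError: some note symbol is not
-- among the first 26 characters of key, or some adjacently-doubled note symbol is not among the
-- first 20 characters of key.  (A symbol whose maximal runs are all even is always doubled, so
-- membership in key[:20] already covers its letter lookup never happening: this condition is exact.)
def Pre_decode_note (note : String) (key : String) : Prop :=
  (note.toList.all fun c =>
    (key.toList.take 26).contains c &&
    (!((note.toList.zip note.toList.tail).contains (c, c)) ||
      (key.toList.take 20).contains c)) = true
instance (note : String) (key : String) : Decidable (Pre_decode_note note key) := by
  unfold Pre_decode_note; infer_instance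

def pvWitness_decode_note : String × String := ("aab", "ab")

def Spec_decode_note (note : String) (key : String) (out : String) : Prop := out = decode_note_alt note key
instance (note : String) (key : String) (out : String) : Decidable (Spec_decode_note note key out) := by unfold Spec_decode_note; infer_instance

-- ===== CLAIM (what is proved, stated in full; the proofs are below) =====
def Claim_equal_decode_note : Prop := ∀ (note : String) (key : String), Dom_decode_note note key → Pre_decode_note note key → Spec_decode_note note key (decode_note note key)

-- ===== LEMMAS AND PROOFS =====

-- A's walk on a run of length n+1 followed by a list not starting with c
theorem pvLoopA_run (s2l sp : PySem.Dict Char Char) (c : Char) :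
    ∀ n rest, (∀ h, rest.head? = some h → h ≠ c) →
      pvLoopA s2l sp (List.replicate (n + 1) c ++ rest) =
        List.replicate ((n + 1) / 2) (sp.getD c c) ++
        (if (n + 1) % 2 ≠ 0 then [s2l.getD c c] else []) ++
        pvLoopA s2l sp rest := by
  intro n
  induction n using Nat.strong_induction_on with
  | _ n ih =>
    intro rest hrest
    match n with
    | 0 =>
      cases rest with
      | nil => simp [pvLoopA]
      | cons h t =>
        have hne : h ≠ c := hrest h rfl
        simp [pvLoopA, hne]
    | 1 =>
      simp [pvLoopA]
    | (m + 2) =>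
      have ih' := ih m (by omega) rest hrest
      have hrep : List.replicate (m + 2 + 1) c ++ rest =
          c :: c :: (List.replicate (m + 1) c ++ rest) := by
        simp [List.replicate_succ]
      rw [hrep]
      generalize hL : List.replicate (m + 1) c ++ rest = L at ih' ⊢
      rw [show pvLoopA s2l sp (c :: c :: L) = sp.getD c c :: pvLoopA s2l sp L from by
        simp [pvLoopA]]
      rw [ih']
      have h1 : (m + 2 + 1) / 2 = (m + 1) / 2 + 1 := by omega
      have h2 : (m + 2 + 1) % 2 = (m + 1) % 2 := by omega
      rw [h1, h2, List.replicate_succ]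
      simp

theorem pvLoopB_flatten_eq (s2l sp : PySem.Dict Char Char) :
    ∀ l, (pvLoopB s2l sp l).flatten = pvLoopA s2l sp l := by
  intro l
  induction hn : l.length using Nat.strong_induction_on generalizing l with
  | _ n ih =>
    cases l with
    | nil => simp [pvLoopB, pvLoopA]
    | cons c rest =>
      have hsplit : rest = rest.takeWhile (· = c) ++ rest.dropWhile (· = c) :=
        (List.takeWhile_append_dropWhile (p := (· = c)) (l := rest)).symm
      have hrep : rest.takeWhile (· = c) =
          List.replicate (rest.takeWhile (· = c)).length c := by
        apply List.eq_replicate_of_mem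
        intro b hb
        have := List.mem_takeWhile_imp hb
        simpa using this
      have hhead : ∀ h, (rest.dropWhile (· = c)).head? = some h → h ≠ c := by
        intro h hh
        have := List.head?_dropWhile_not (p := (· = c)) (l := rest)
        rw [hh] at this
        simpa using this
      have hlen : (rest.dropWhile (· = c)).length < n := by
        subst hn
        simp only [List.length_cons]
        exact Nat.lt_succ_of_le (List.length_dropWhile_le _ _)
      have hcons : c :: rest =
          List.replicate ((rest.takeWhile (· = c)).length + 1) c ++
            rest.dropWhile (· = c) := by
        rw [List.replicate_succ, List.cons_append]
        conv_lhs => rw [hsplit, hrep]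
      have e1 : (if ((rest.takeWhile (· = c)).length + 1) / 2 ≠ 0 then
            [List.replicate (((rest.takeWhile (· = c)).length + 1) / 2) (sp.getD c c)]
          else []).flatten
          = List.replicate (((rest.takeWhile (· = c)).length + 1) / 2) (sp.getD c c) := by
        split_ifs with h
        · simp
        · have h0 : ((rest.takeWhile (· = c)).length + 1) / 2 = 0 := by omega
          simp [h0]
      have e2 : (if ((rest.takeWhile (· = c)).length + 1) % 2 ≠ 0 then
            [[s2l.getD c c]] else []).flatten
          = (if ((rest.takeWhile (· = c)).length + 1) % 2 ≠ 0 then [s2l.getD c c] else []) := by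
        split_ifs <;> simp
      rw [pvLoopB, List.flatten_append, List.flatten_append, ih _ hlen _ rfl, e1, e2]
      rw [hcons, pvLoopA_run s2l sp c _ _ hhead]

-- ===== VERDICT (by name: the statement is the Claim_ definition above) =====
theorem decode_note_spec : Claim_equal_decode_note := by
  intro note key _ _
  unfold Spec_decode_note decode_note decode_note_alt
  simp only [pvLoopB_flatten_eq]
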